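-- pv_equiv track=rewrite | github.com/DarcStar-Solutions-Tech/dilated-attention-pytorch | benchmarks/ring/extreme_sequence_benchmark.py | get_optimal_segment_lengths
-- ===== SOURCE A (Python) =====
-- from typing import Dict, List, Tuple
--
-- def get_optimal_segment_lengths(seq_len: int) -> Tuple[List[int], List[int]]:
--     """Get optimal segment lengths and dilation rates for given sequence length."""
--     # For extreme sequences, use larger segments
--     if seq_len >= 1_000_000:
--         base_segment = 16384
--     elif seq_len >= 100_000:
--         base_segment = 8192
--     else:
--         base_segment = 4096
--
--     # Create geometric sequence
--     segments = []
--     dilations = []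
--
--     current_segment = base_segment
--     current_dilation = 1
--
--     while current_segment <= seq_len:
--         segments.append(current_segment)
--         dilations.append(current_dilation)
--         current_segment *= 2
--         current_dilation *= 2
--
--         # Limit to reasonable number of segments
--         if len(segments) >= 6:
--             break
--
--     # Ensure last segment covers the sequence
--     if segments:
--         segments[-1] = min(segments[-1], seq_len)
--
--     return segments, dilations
-- ===== SOURCE B (Python) =====
-- def get_optimal_segment_lengths(seq_len):
--     """Closed-form version: compute the segment count via bit_length instead of looping."""
--     if seq_len >= 1_000_000:
--         base_segment = 16384
--     elif seq_len >= 100_000: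
--         base_segment = 8192
--     else:
--         base_segment = 4096
--
--     q = seq_len // base_segment
--     count = min(6, q.bit_length()) if q > 0 else 0
--
--     segments = [base_segment * 2 ** i for i in range(count)]
--     dilations = [2 ** i for i in range(count)]
--
--     if segments:
--         segments[-1] = min(segments[-1], seq_len)
--
--     return segments, dilations
-- ===== Notes on version B (the rewrite author's own statement) =====
-- stated objective: simpler
-- what changed: Replaces A's while-loop (doubling accumulator with a break at 6 segments) by a closed-form segment count via bit_length of seq_len // base_segment, building both lists directly with comprehensions.
import Mathlib
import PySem

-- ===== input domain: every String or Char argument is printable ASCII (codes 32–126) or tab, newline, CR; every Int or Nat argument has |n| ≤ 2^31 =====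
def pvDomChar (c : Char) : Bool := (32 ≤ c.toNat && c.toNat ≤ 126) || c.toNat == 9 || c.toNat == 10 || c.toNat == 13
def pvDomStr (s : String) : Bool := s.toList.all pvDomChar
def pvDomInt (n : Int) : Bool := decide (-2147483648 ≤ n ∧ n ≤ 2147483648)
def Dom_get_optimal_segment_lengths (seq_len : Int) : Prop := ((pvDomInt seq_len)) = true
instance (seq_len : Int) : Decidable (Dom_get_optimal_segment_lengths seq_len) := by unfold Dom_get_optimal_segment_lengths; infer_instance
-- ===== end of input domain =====

-- B replaces A's while-loop by a closed-form segment count (bit_length) and builds both lists directly.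

-- ===== PORT A =====
-- the while-loop of A: state (segments, dilations, current_segment, current_dilation); break at 6 segments
def getOptLoop (seq_len : Int) (segments dilations : List Int) (cur_seg cur_dil : Int) :
    List Int × List Int :=
  if cur_seg ≤ seq_len then
    if 6 ≤ (segments ++ [cur_seg]).length then (segments ++ [cur_seg], dilations ++ [cur_dil])
    else getOptLoop seq_len (segments ++ [cur_seg]) (dilations ++ [cur_dil]) (cur_seg * 2) (cur_dil * 2)
  else (segments, dilations)
termination_by 6 - segments.length
decreasing_by simp only [List.length_append, List.length_cons, List.length_nil] at *; omega

def get_optimal_segment_lengths (seq_len : Int) : List Int × List Int :=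
  let base_segment : Int :=
    if seq_len ≥ 1000000 then 16384 else if seq_len ≥ 100000 then 8192 else 4096
  let p := getOptLoop seq_len [] [] base_segment 1
  let segments := p.1
  let dilations := p.2
  -- segments[-1] = min(segments[-1], seq_len) on a nonempty list
  if segments = [] then (segments, dilations)
  else (segments.dropLast ++ [min (segments.getLastD 0) seq_len], dilations)

-- ===== PORT B =====
def get_optimal_segment_lengths_alt (seq_len : Int) : List Int × List Int :=
  let base_segment : Int :=
    if seq_len ≥ 1000000 then 16384 else if seq_len ≥ 100000 then 8192 else 4096
  let q := PySem.Int.floordiv seq_len base_segment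
  let count : Nat := if 0 < q then min 6 (PySem.Int.bitLength q) else 0
  let segments := (List.range count).map (fun i => base_segment * 2 ^ i)
  let dilations := (List.range count).map (fun i => (2 : Int) ^ i)
  if segments = [] then (segments, dilations)
  else (segments.dropLast ++ [min (segments.getLastD 0) seq_len], dilations)

-- ===== PRECONDITION & SPEC =====
def Spec_get_optimal_segment_lengths (seq_len : Int) (out : List Int × List Int) : Prop := out = get_optimal_segment_lengths_alt seq_len
instance (seq_len : Int) (out : List Int × List Int) : Decidable (Spec_get_optimal_segment_lengths seq_len out) := by unfold Spec_get_optimal_segment_lengths; infer_instance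

-- ===== CLAIM (what is proved, stated in full; the proofs are below) =====
def Claim_equal_get_optimal_segment_lengths : Prop := ∀ (seq_len : Int), Dom_get_optimal_segment_lengths seq_len → Spec_get_optimal_segment_lengths seq_len (get_optimal_segment_lengths seq_len)

-- ===== LEMMAS AND PROOFS =====

-- proof-side count: number of doublings of c that stay ≤ s, capped by the fuel f
def pvCnt (s : Int) (c : Int) : Nat → Nat
  | 0 => 0
  | f + 1 => if c ≤ s then pvCnt s (c * 2) f + 1 else 0

-- B's count expression, as a function of q
def pvBlen (q : Int) : Nat := if 0 < q then PySem.Int.bitLength q else 0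

lemma pvBlen_step (q : Int) (hq : 0 < q) : pvBlen q = pvBlen (q / 2) + 1 := by
  have h2 : PySem.Int.floordiv q 2 = q / 2 := PySem.Int.floordiv_eq_ediv_of_pos (by norm_num)
  unfold pvBlen
  rw [if_pos hq, PySem.Int.bitLength_of_pos hq, h2]
  by_cases h : 0 < q / 2
  · rw [if_pos h]
  · rw [if_neg h]
    have hz : q / 2 = 0 := by omega
    rw [hz]
    decide

lemma pvCnt_eq (s : Int) (f : Nat) : ∀ (c : Int), 0 < c →
    pvCnt s c f = min f (pvBlen (s / c)) := by
  induction f with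
  | zero => intro c hc; simp [pvCnt]
  | succ f ih =>
    intro c hc
    unfold pvCnt
    by_cases h : c ≤ s
    · rw [if_pos h]
      have hq : 0 < s / c := by
        have := (Int.le_ediv_iff_mul_le hc (a := 1) (b := s)).mpr (by linarith)
        omega
      have hcomp : s / (c * 2) = (s / c) / 2 := by
        rw [Int.ediv_ediv_of_nonneg (le_of_lt hc)]
      rw [ih (c * 2) (by positivity), hcomp, pvBlen_step (s / c) hq]
      omega
    · rw [if_neg h]
      have hlt : s / c < 1 := (Int.ediv_lt_iff_lt_mul hc (b := 1)).mpr (by linarith)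
      unfold pvBlen
      rw [if_neg (by omega)]
      simp

lemma getOptLoop_eq (s : Int) : ∀ (f : Nat), 1 ≤ f → ∀ (segs dils : List Int) (c d : Int),
    segs.length + f = 6 →
    getOptLoop s segs dils c d =
      (segs ++ (List.range (pvCnt s c f)).map (fun i => c * 2 ^ i),
       dils ++ (List.range (pvCnt s c f)).map (fun i => d * 2 ^ i)) := by
  intro f
  induction f with
  | zero => intro h; exact absurd h (by omega)
  | succ f ih =>
    intro _ segs dils c d hlen
    rw [getOptLoop]
    by_cases h : c ≤ s
    · rw [if_pos h]
      by_cases hb : 6 ≤ (segs ++ [c]).length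
      · rw [if_pos hb]
        have hf : f = 0 := by simp [List.length_append] at hb hlen ⊢; omega
        subst hf
        simp [pvCnt, h, List.range_one]
      · rw [if_neg hb]
        have h1f : 1 ≤ f := by simp [List.length_append] at hb hlen ⊢; omega
        rw [ih h1f (segs ++ [c]) (dils ++ [d]) (c * 2) (d * 2)
            (by simp [List.length_append] at hlen ⊢; omega)]
        have hc6 : pvCnt s c (f + 1) = pvCnt s (c * 2) f + 1 := by simp [pvCnt, h]
        rw [hc6]
        have key : ∀ (x : Int) (m : Nat),
            x :: (List.range m).map (fun i => x * 2 * 2 ^ i) =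
            (List.range (m + 1)).map (fun i => x * 2 ^ i) := by
          intro x m
          rw [List.range_succ_eq_map]
          have hfun : (fun i : Nat => x * 2 ^ (i + 1)) = fun i : Nat => x * 2 * 2 ^ i := by
            funext i; rw [pow_succ]; ring
          simp [List.map_map, Function.comp_def, hfun]
        rw [List.append_assoc, List.singleton_append, key c (pvCnt s (c * 2) f),
            List.append_assoc, List.singleton_append, key d (pvCnt s (c * 2) f)]
    · rw [if_neg h]
      have hc0 : pvCnt s c (f + 1) = 0 := by simp [pvCnt, h]
      simp [hc0]

-- ===== VERDICT (by name: the statement is the Claim_ definition above) =====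
theorem get_optimal_segment_lengths_spec : Claim_equal_get_optimal_segment_lengths := by
  intro s _
  show get_optimal_segment_lengths s = get_optimal_segment_lengths_alt s
  unfold get_optimal_segment_lengths get_optimal_segment_lengths_alt
  set b : Int := if s ≥ 1000000 then 16384 else if s ≥ 100000 then 8192 else 4096 with hbdef
  have hbpos : 0 < b := by rw [hbdef]; split_ifs <;> norm_num
  have hq : PySem.Int.floordiv s b = s / b := PySem.Int.floordiv_eq_ediv_of_pos hbpos
  have hcount : (if 0 < PySem.Int.floordiv s b then min 6 (PySem.Int.bitLength (PySem.Int.floordiv s b)) else 0)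
      = min 6 (pvBlen (s / b)) := by
    rw [hq]; unfold pvBlen
    by_cases h : 0 < s / b
    · simp [h]
    · simp [h]
  have hloop := getOptLoop_eq s 6 (by norm_num) [] [] b 1 (by simp)
  rw [pvCnt_eq s 6 b hbpos] at hloop
  simp only [hloop, hcount, List.nil_append, one_mul]
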